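-- pv_equiv track=rewrite | github.com/Bokipr0/Airtable-rag | mvp_molecules_from_sources.py | _all_strings
-- ===== SOURCE A (Python) =====
-- def _all_strings(section_info_list, max_vals=6):
--     """Collects up to max_vals non-empty String values from an Information list."""
--     vals = []
--     for info in section_info_list:
--         for swm in info.get("Value", {}).get("StringWithMarkup", []):
--             v = swm.get("String", "").strip()
--             if v and v not in vals:
--                 vals.append(v)
--                 if len(vals) >= max_vals:
--                     return vals
--     return vals
-- ===== SOURCE B (Python) =====
-- def _all_strings(section_info_list, max_vals=6):
--     """Collects up to max_vals non-empty String values from an Information list."""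
--     # Sort-then-scan dedup: tag every stripped non-empty string with its position,
--     # group duplicates by sorting on the value, keep the smallest position of each
--     # group, then restore first-occurrence order by sorting on position and cut.
--     indexed = [(i, v) for i, v in enumerate(
--                    swm.get("String", "").strip()
--                    for info in section_info_list
--                    for swm in info.get("Value", {}).get("StringWithMarkup", []))
--                if v]
--     indexed.sort(key=lambda p: p[1])
--     firsts = []
--     for i, v in indexed:
--         if firsts and firsts[-1][1] == v:
--             firsts[-1] = (min(firsts[-1][0], i), v)
--         else:
--             firsts.append((i, v))
--     firsts.sort(key=lambda p: p[0])
--     return [v for _, v in firsts[:max_vals]] if max_vals > 0 else []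
-- ===== Notes on version B (the rewrite author's own statement) =====
-- stated objective: alternative
-- what changed: Replaces A's fused loop with running list-membership checks and an early return by a sort-then-scan dedup: tag each stripped non-empty string with its position, sort by value so duplicates become adjacent, keep the minimal position per run in one adjacent scan, re-sort by position and slice to max_vals.
-- intended difference: On inputs with max_vals <= 0 that contain a non-empty stripped string, A returns a one-element list (its size check only fires after the first append) while B returns an empty list, the intended result of asking for at most a non-positive number of values. — e.g. on _all_strings([[("Value", [("StringWithMarkup", [[("String", "x")]])])]], 0): A returns ["x"], B returns []
import Mathlib
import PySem

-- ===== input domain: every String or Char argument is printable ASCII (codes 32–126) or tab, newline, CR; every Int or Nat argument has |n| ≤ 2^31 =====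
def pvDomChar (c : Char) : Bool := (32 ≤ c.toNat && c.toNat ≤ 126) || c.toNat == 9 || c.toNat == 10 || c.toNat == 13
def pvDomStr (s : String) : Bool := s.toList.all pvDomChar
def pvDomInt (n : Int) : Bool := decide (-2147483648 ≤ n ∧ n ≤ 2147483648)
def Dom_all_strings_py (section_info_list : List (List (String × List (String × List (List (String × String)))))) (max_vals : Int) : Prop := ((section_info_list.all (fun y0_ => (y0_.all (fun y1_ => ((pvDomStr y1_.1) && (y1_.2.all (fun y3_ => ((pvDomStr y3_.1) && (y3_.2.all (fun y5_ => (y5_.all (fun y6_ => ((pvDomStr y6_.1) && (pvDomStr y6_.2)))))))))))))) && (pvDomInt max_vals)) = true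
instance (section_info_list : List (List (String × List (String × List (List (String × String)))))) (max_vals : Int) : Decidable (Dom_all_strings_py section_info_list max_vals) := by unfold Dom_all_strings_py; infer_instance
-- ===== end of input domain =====

-- B replaces A's fused membership-checking loop by a sort-then-scan dedup (tag with positions, sort by
-- value, keep the minimal position of each adjacent run, re-sort by position, slice); on max_vals ≤ 0
-- with a nonempty string present A returns one value, B returns the intended [] (see D_ below).

-- ===== PORT A =====
-- swm.get("String", "").strip()
def pvStripOf (swm : List (String × String)) : String :=
  PySem.Str.strip ((PySem.Dict.mk swm).getD "String" "")

-- info.get("Value", {}).get("StringWithMarkup", [])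
def pvSwms (info : List (String × List (String × List (List (String × String))))) :
    List (List (String × String)) :=
  (PySem.Dict.mk ((PySem.Dict.mk info).getD "Value" [])).getD "StringWithMarkup" []

-- inner 'for swm in …' loop; Bool flag records the early 'return vals'
def pvInnerA (max_vals : Int) : List (List (String × String)) → List String → (List String × Bool)
  | [], vals => (vals, false)
  | swm :: rest, vals =>
    let v := pvStripOf swm
    if v ≠ "" ∧ v ∉ vals then
      let vals' := vals ++ [v]
      if max_vals ≤ (vals'.length : Int) then (vals', true) else pvInnerA max_vals rest vals'
    else pvInnerA max_vals rest vals

-- outer 'for info in …' loop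
def pvOuterA (max_vals : Int) :
    List (List (String × List (String × List (List (String × String))))) → List String → List String
  | [], vals => vals
  | info :: rest, vals =>
    let r := pvInnerA max_vals (pvSwms info) vals
    if r.2 then r.1 else pvOuterA max_vals rest r.1

def all_strings_py (section_info_list : List (List (String × List (String × List (List (String × String)))))) (max_vals : Int) : List String :=
  pvOuterA max_vals section_info_list []

-- ===== PORT B =====
-- the 'for i, v in indexed: …' scan: merge adjacent pairs with equal value, keeping the min position
def pvRunsGo (cur : Int × String) : List (Int × String) → List (Int × String)
  | [] => [cur]
  | q :: rest =>
    if q.2 = cur.2 then pvRunsGo (min cur.1 q.1, q.2) rest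
    else cur :: pvRunsGo q rest

def pvRuns : List (Int × String) → List (Int × String)
  | [] => []
  | p :: rest => pvRunsGo p rest

def all_strings_py_alt (section_info_list : List (List (String × List (String × List (List (String × String)))))) (max_vals : Int) : List String :=
  let flat := section_info_list.flatMap (fun info => (pvSwms info).map pvStripOf)
  let indexed := (PySem.List.enumerate flat).filter (fun p => p.2 != "")
  let byVal := PySem.List.sorted indexed (fun p => p.2) false
  let firsts := PySem.List.sorted (pvRuns byVal) (fun p => p.1) false
  if 0 < max_vals then (PySem.List.slice firsts none (some max_vals)).map (fun p => p.2) else []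

-- ===== PRECONDITION & SPEC =====
-- On inputs with max_vals ≤ 0 that contain a non-empty stripped String, A returns a singleton list
-- (its size check fires only after the first append), while B returns the intended empty list
-- ("up to max_vals" values with a non-positive cap is none).
def D_all_strings_py (section_info_list : List (List (String × List (String × List (List (String × String)))))) (max_vals : Int) : Prop :=
  max_vals ≤ 0 ∧
    ∃ info ∈ section_info_list,
      ∃ swm ∈ (List.lookup "StringWithMarkup" ((List.lookup "Value" info).getD [])).getD [],
        PySem.Str.strip ((List.lookup "String" swm).getD "") ≠ ""

instance (section_info_list : List (List (String × List (String × List (List (String × String)))))) (max_vals : Int) : Decidable (D_all_strings_py section_info_list max_vals) := by unfold D_all_strings_py; infer_instance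

def Spec_all_strings_py (section_info_list : List (List (String × List (String × List (List (String × String)))))) (max_vals : Int) (out : List String) : Prop := ¬ D_all_strings_py section_info_list max_vals → out = all_strings_py_alt section_info_list max_vals
instance (section_info_list : List (List (String × List (String × List (List (String × String)))))) (max_vals : Int) (out : List String) : Decidable (Spec_all_strings_py section_info_list max_vals out) := by unfold Spec_all_strings_py; infer_instance

def pvDiffWitness_all_strings_py : (List (List (String × List (String × List (List (String × String)))))) × Int :=
  ([[("Value", [("StringWithMarkup", [[("String", "x")]])])]], 0)
def pvDiffWitnessOut_all_strings_py : (List String) × (List String) := (["x"], [])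

-- ===== CLAIM (what is proved, stated in full; the proofs are below) =====
def Claim_unchanged_all_strings_py : Prop := ∀ (section_info_list : List (List (String × List (String × List (List (String × String)))))) (max_vals : Int), Dom_all_strings_py section_info_list max_vals → Spec_all_strings_py section_info_list max_vals (all_strings_py section_info_list max_vals)
def Claim_changed_all_strings_py : Prop := Dom_all_strings_py (pvDiffWitness_all_strings_py.1) (pvDiffWitness_all_strings_py.2) ∧ D_all_strings_py (pvDiffWitness_all_strings_py.1) (pvDiffWitness_all_strings_py.2) ∧ all_strings_py (pvDiffWitness_all_strings_py.1) (pvDiffWitness_all_strings_py.2) = pvDiffWitnessOut_all_strings_py.1 ∧ all_strings_py_alt (pvDiffWitness_all_strings_py.1) (pvDiffWitness_all_strings_py.2) = pvDiffWitnessOut_all_strings_py.2 ∧ pvDiffWitnessOut_all_strings_py.1 ≠ pvDiffWitnessOut_all_strings_py.2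
def Claim_exact_all_strings_py : Prop := ∀ (section_info_list : List (List (String × List (String × List (List (String × String)))))) (max_vals : Int), Dom_all_strings_py section_info_list max_vals → D_all_strings_py section_info_list max_vals → all_strings_py section_info_list max_vals ≠ all_strings_py_alt section_info_list max_vals

-- ===== LEMMAS AND PROOFS =====

-- A's fused loop, re-expressed over an already-flattened, already-stripped list of strings
def pvGo (max_vals : Int) : List String → List String → (List String × Bool)
  | [], vals => (vals, false)
  | v :: s, vals =>
    if v ≠ "" ∧ v ∉ vals then
      let vals' := vals ++ [v]
      if max_vals ≤ (vals'.length : Int) then (vals', true) else pvGo max_vals s vals'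
    else pvGo max_vals s vals

theorem pvInnerA_eq_go (mv : Int) (swms : List (List (String × String))) (vals : List String) :
    pvInnerA mv swms vals = pvGo mv (swms.map pvStripOf) vals := by
  induction swms generalizing vals with
  | nil => rfl
  | cons swm rest ih =>
    simp only [pvInnerA, pvGo, List.map]
    split_ifs <;> simp [ih]

theorem pvGo_append (mv : Int) (s t : List String) (vals : List String) :
    pvGo mv (s ++ t) vals = (if (pvGo mv s vals).2 then pvGo mv s vals else pvGo mv t (pvGo mv s vals).1) := by
  induction s generalizing vals with
  | nil => simp [pvGo]
  | cons v s ih =>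
    simp only [List.cons_append, pvGo]
    split_ifs with h1 h2 <;> simp_all

theorem pvOuterA_eq_go (mv : Int)
    (infos : List (List (String × List (String × List (List (String × String)))))) (vals : List String) :
    pvOuterA mv infos vals = (pvGo mv (infos.flatMap (fun info => (pvSwms info).map pvStripOf)) vals).1 := by
  induction infos generalizing vals with
  | nil => rfl
  | cons info rest ih =>
    simp only [pvOuterA, List.flatMap_cons, pvGo_append, pvInnerA_eq_go]
    split_ifs with h
    · rfl
    · exact ih _

-- the first empty-string-filtering dedup accumulator
def pvDd (s : List String) (vals : List String) : List String :=
  s.foldl (fun acc v => if v ≠ "" ∧ v ∉ acc then acc ++ [v] else acc) vals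

theorem pvDd_eq_set (s : List String) (vals : List String) :
    pvDd s vals = (s.filter (fun v => v != "")).foldl PySem.Set.add vals := by
  induction s generalizing vals with
  | nil => rfl
  | cons v s ih =>
    simp only [pvDd, List.foldl, List.filter_cons]
    by_cases hv : v = ""
    · rw [if_neg (by simp [hv]), if_neg (by simp [hv])]
      exact ih vals
    · by_cases hm : v ∈ vals
      · rw [if_neg (by tauto), if_pos (by simp [hv])]
        simp only [List.foldl]
        rw [show PySem.Set.add vals v = vals from by
          simp [PySem.Set.add, PySem.Set.contains, hm]]
        exact ih vals
      · rw [if_pos ⟨hv, hm⟩, if_pos (by simp [hv])]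
        simp only [List.foldl]
        rw [show PySem.Set.add vals v = vals ++ [v] from by
          simp [PySem.Set.add, PySem.Set.contains, hm]]
        exact ih (vals ++ [v])

theorem pvDd_cons (v : String) (s : List String) (vals : List String) :
    pvDd (v :: s) vals = pvDd s (if v ≠ "" ∧ v ∉ vals then vals ++ [v] else vals) := rfl

theorem pvDd_prefix (s : List String) (vals : List String) : ∃ r, pvDd s vals = vals ++ r := by
  induction s generalizing vals with
  | nil => exact ⟨[], by simp [pvDd]⟩
  | cons v s ih =>
    simp only [pvDd, List.foldl]
    split_ifs with h
    · obtain ⟨r, hr⟩ := ih (vals ++ [v]); exact ⟨v :: r, by simpa using hr⟩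
    · exact ih vals

theorem pvGo_take (mv : Int) (s : List String) (vals : List String)
    (h : (vals.length : Int) < mv) :
    (pvGo mv s vals).1 = (pvDd s vals).take mv.toNat := by
  induction s generalizing vals with
  | nil =>
    simp only [pvGo, pvDd, List.foldl]
    exact (List.take_of_length_le (by omega)).symm
  | cons v s ih =>
    simp only [pvGo, pvDd_cons]
    split_ifs with h1 h2
    · -- appended and cap reached: mv = vals.length + 1
      obtain ⟨r, hr⟩ := pvDd_prefix s (vals ++ [v])
      show (vals ++ [v]) = _
      rw [show pvDd s (vals ++ [v]) = (vals ++ [v]) ++ r from hr]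
      have : mv.toNat = (vals ++ [v]).length := by
        have h2' : mv ≤ (vals.length : Int) + 1 := by simpa using h2
        simp only [List.length_append, List.length_cons, List.length_nil]
        omega
      rw [this, List.take_left]
    · exact ih (vals ++ [v]) (by simp at h2 ⊢; omega)
    · exact ih vals h

theorem pvGo_all_empty (mv : Int) (s : List String) (vals : List String)
    (h : ∀ v ∈ s, v = "") : pvGo mv s vals = (vals, false) := by
  induction s generalizing vals with
  | nil => rfl
  | cons v s ih =>
    have hv : v = "" := h v (by simp)
    simp only [pvGo]
    rw [if_neg (by simp [hv])]
    exact ih vals (fun u hu => h u (by simp [hu]))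

theorem pvGo_ne_nil (mv : Int) (s : List String) (vals : List String)
    (h : (∃ v ∈ s, v ≠ "") ∨ vals ≠ []) : (pvGo mv s vals).1 ≠ [] := by
  induction s generalizing vals with
  | nil =>
    simp only [pvGo]
    rcases h with h | h
    · simp at h
    · exact h
  | cons v s ih =>
    simp only [pvGo]
    split_ifs with h1 h2
    · simp
    · exact ih (vals ++ [v]) (Or.inr (by simp))
    · rcases h with h | h
      · rcases h with ⟨u, hu, hune⟩
        rcases List.mem_cons.mp hu with rfl | hu'
        · have hv : u ∈ vals := by
            by_contra hvv
            exact h1 ⟨hune, hvv⟩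
          exact ih vals (Or.inr (fun hn => by simp [hn] at hv))
        · exact ih vals (Or.inl ⟨u, hu', hune⟩)
      · exact ih vals (Or.inr h)

-- a first-match association lookup is Dict.getD
theorem pvLookup_getD {ν : Type} (xs : List (String × ν)) (k : String) (dflt : ν) :
    (List.lookup k xs).getD dflt = PySem.Dict.getD (PySem.Dict.mk xs) k dflt := by
  induction xs with
  | nil => rfl
  | cons p rest ih =>
    rcases p with ⟨k', v⟩
    by_cases hk : k = k'
    · subst hk
      simp [List.lookup, PySem.Dict.getD, PySem.Dict.get?_mk_cons]
    · have h1 : (k == k') = false := beq_eq_false_iff_ne.mpr hk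
      have h2 : (k' == k) = false := beq_eq_false_iff_ne.mpr (fun h => hk (Eq.symm h))
      simpa [List.lookup, h1, h2, PySem.Dict.getD, PySem.Dict.get?_mk_cons] using ih

-- membership bridge between D_'s condition and the flattened stream
theorem pvD_stream_iff (l : List (List (String × List (String × List (List (String × String)))))) :
    (∃ info ∈ l,
      ∃ swm ∈ (List.lookup "StringWithMarkup" ((List.lookup "Value" info).getD [])).getD [],
        PySem.Str.strip ((List.lookup "String" swm).getD "") ≠ "")
    ↔ ∃ v ∈ l.flatMap (fun info => (pvSwms info).map pvStripOf), v ≠ "" := by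
  unfold pvSwms pvStripOf
  simp only [pvLookup_getD, List.mem_flatMap, List.mem_map]
  constructor
  · rintro ⟨info, hi, swm, hs, hne⟩
    exact ⟨_, ⟨info, hi, swm, hs, rfl⟩, hne⟩
  · rintro ⟨v, ⟨info, hi, swm, hs, rfl⟩, hne⟩
    exact ⟨info, hi, swm, hs, hne⟩

-- ============ B-side: sort-then-scan dedup equals first-occurrence dedup ============

-- reference first-occurrence dedup on value lists (filter after recursing: structural)
def pvValRef : List String → List String
  | [] => []
  | v :: rest => v :: (pvValRef rest).filter (fun z => z != v)

-- reference first-occurrence dedup on (position, value) pairs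
def pvRef : List (Int × String) → List (Int × String)
  | [] => []
  | p :: rest => p :: (pvRef rest).filter (fun q => q.2 != p.2)

theorem pvFoldl_add_cons (x : String) (xs acc : List String) :
    xs.foldl PySem.Set.add (x :: acc) = x :: (xs.filter (fun z => z != x)).foldl PySem.Set.add acc := by
  induction xs generalizing acc with
  | nil => rfl
  | cons y rest ih =>
    by_cases hy : y = x
    · subst hy
      rw [List.filter_cons_of_neg (by simp)]
      simp only [List.foldl]
      rw [show PySem.Set.add (y :: acc) y = y :: acc from by
        simp [PySem.Set.add, PySem.Set.contains]]
      exact ih acc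
    · rw [List.filter_cons_of_pos (by simp [hy])]
      simp only [List.foldl]
      rw [show PySem.Set.add (x :: acc) y = x :: PySem.Set.add acc y from by
        by_cases hm : y ∈ acc
        · simp [PySem.Set.add, PySem.Set.contains, hm, hy]
        · simp [PySem.Set.add, PySem.Set.contains, hm, hy]]
      exact ih (PySem.Set.add acc y)

theorem pvFoldl_add_filter (p : String → Bool) (xs acc : List String) :
    (xs.foldl PySem.Set.add acc).filter p = (xs.filter p).foldl PySem.Set.add (acc.filter p) := by
  induction xs generalizing acc with
  | nil => rfl
  | cons y rest ih =>
    simp only [List.foldl, List.filter_cons]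
    by_cases hm : y ∈ acc
    · rw [show PySem.Set.add acc y = acc from by simp [PySem.Set.add, PySem.Set.contains, hm]]
      by_cases hp : p y
      · rw [if_pos hp]
        simp only [List.foldl]
        rw [show PySem.Set.add (acc.filter p) y = acc.filter p from by
          simp [PySem.Set.add, PySem.Set.contains, List.mem_filter]
          exact ⟨hm, hp⟩]
        exact ih acc
      · rw [if_neg hp]; exact ih acc
    · rw [show PySem.Set.add acc y = acc ++ [y] from by
        simp [PySem.Set.add, PySem.Set.contains, hm]]
      by_cases hp : p y
      · rw [if_pos hp]
        simp only [List.foldl]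
        rw [show PySem.Set.add (acc.filter p) y = acc.filter p ++ [y] from by
          simp [PySem.Set.add, PySem.Set.contains, List.mem_filter, hp, hm]]
        rw [ih (acc ++ [y]), List.filter_append, List.filter_cons, if_pos hp]
        rfl
      · rw [if_neg hp]
        rw [ih (acc ++ [y]), List.filter_append, List.filter_cons, if_neg hp]
        simp
theorem pvOfList_filter (p : String → Bool) (xs : List String) :
    PySem.Set.ofList (xs.filter p) = (PySem.Set.ofList xs).filter p := by
  rw [PySem.Set.ofList_eq_foldl, PySem.Set.ofList_eq_foldl, pvFoldl_add_filter]
  rfl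

theorem pvValRef_eq_ofList (u : List String) : pvValRef u = PySem.Set.ofList u := by
  induction u with
  | nil => rfl
  | cons v rest ih =>
    rw [pvValRef, ih, ← pvOfList_filter]
    rw [PySem.Set.ofList_eq_foldl, PySem.Set.ofList_eq_foldl]
    simp only [List.foldl]
    rw [show PySem.Set.add [] v = v :: [] from rfl, pvFoldl_add_cons]

theorem pvRef_map_snd (L : List (Int × String)) :
    (pvRef L).map (fun p => p.2) = pvValRef (L.map (fun p => p.2)) := by
  induction L with
  | nil => rfl
  | cons p rest ih =>
    simp only [List.map_cons]
    rw [pvRef, pvValRef]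
    simp only [List.map_cons, List.cons.injEq, true_and]
    rw [← ih]
    generalize (pvRef rest) = M
    induction M with
    | nil => rfl
    | cons q t iht =>
      by_cases hq : q.2 = p.2
      · simp [hq, iht]
      · simp [hq, iht]

theorem pvRef_sublist (L : List (Int × String)) : (pvRef L).Sublist L := by
  induction L with
  | nil => exact List.Sublist.refl _
  | cons p rest ih =>
    rw [pvRef]
    exact List.Sublist.cons₂ p (List.filter_sublist.trans ih)

theorem pvRef_min (L : List (Int × String)) (hL : L.Pairwise (fun p q => p.1 < q.1)) :
    ∀ p ∈ pvRef L, ∀ q ∈ L, q.2 = p.2 → p.1 ≤ q.1 := by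
  induction L with
  | nil => intro p hp; simp [pvRef] at hp
  | cons x rest ih =>
    rw [pvRef]
    rcases List.pairwise_cons.mp hL with ⟨hx, hrest⟩
    intro p hp q hq hqp
    rcases List.mem_cons.mp hp with rfl | hp'
    · rcases List.mem_cons.mp hq with rfl | hq'
      · exact le_refl _
      · exact le_of_lt (hx q hq')
    · have hpne : p.2 ≠ x.2 := by simpa using List.of_mem_filter hp'
      rcases List.mem_cons.mp hq with rfl | hq'
      · exact absurd hqp.symm hpne
      · exact ih hrest p (List.mem_filter.mp hp').1 q hq' hqp

theorem pvRef_pairwise (L : List (Int × String)) (hL : L.Pairwise (fun p q => p.1 < q.1)) :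
    (pvRef L).Pairwise (fun p q => p.1 < q.1) :=
  hL.sublist (pvRef_sublist L)

-- the adjacent-run scan: membership + minimality + strictly increasing values + completeness
theorem pvRunsGo_spec (S : List (Int × String)) (cur : Int × String)
    (h : (cur :: S).Pairwise (fun p q => p.2 ≤ q.2)) :
    (∀ p ∈ pvRunsGo cur S, p ∈ cur :: S ∧ ∀ q ∈ cur :: S, q.2 = p.2 → p.1 ≤ q.1)
    ∧ ((pvRunsGo cur S).map (fun p => p.2)).Pairwise (· < ·)
    ∧ (∀ q ∈ cur :: S, q.2 ∈ (pvRunsGo cur S).map (fun p => p.2)) := by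
  induction S generalizing cur with
  | nil =>
    refine ⟨?_, by simp [pvRunsGo], ?_⟩
    · intro p hp
      simp only [pvRunsGo, List.mem_singleton] at hp
      subst hp
      exact ⟨by simp, by intro q hq hq2; simp at hq; simp [hq]⟩
    · intro q hq; simp at hq; simp [pvRunsGo, hq]
  | cons q rest ih =>
    rcases List.pairwise_cons.mp h with ⟨hcur, hqrest⟩
    rcases List.pairwise_cons.mp hqrest with ⟨hq, hrest⟩
    by_cases hv : q.2 = cur.2
    · -- merge: continue with (min cur.1 q.1, q.2)
      have h' : ((min cur.1 q.1, q.2) :: rest).Pairwise (fun p q => p.2 ≤ q.2) :=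
        List.pairwise_cons.mpr ⟨fun r hr => hq r hr, hrest⟩
      obtain ⟨ihm, ihp, ihc⟩ := ih _ h'
      have hstep : pvRunsGo cur (q :: rest) = pvRunsGo (min cur.1 q.1, q.2) rest := by
        simp [pvRunsGo, hv]
      refine ⟨?_, by rw [hstep]; exact ihp, ?_⟩
      · intro p hp
        rw [hstep] at hp
        obtain ⟨hpm, hpmin⟩ := ihm p hp
        constructor
        · rcases List.mem_cons.mp hpm with hpeq | hpm'
          · have hcq : (min cur.1 q.1, q.2) = cur ∨ (min cur.1 q.1, q.2) = q := by
              rcases le_total cur.1 q.1 with hle | hle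
              · left; simp [min_eq_left hle, hv]
              · right; simp [min_eq_right hle]
            rcases hcq with hcq | hcq
            · rw [hpeq, hcq]; simp
            · rw [hpeq, hcq]; simp
          · right; right; exact hpm'
        · intro r hr hr2
          rcases List.mem_cons.mp hr with hreq | hr'
          · -- r = cur
            have h1 : p.1 ≤ min cur.1 q.1 :=
              hpmin (min cur.1 q.1, q.2) (by simp) (by rw [hv, ← hreq, hr2])
            rw [hreq]
            exact le_trans h1 (min_le_left _ _)
          · rcases List.mem_cons.mp hr' with hreq | hr''
            · -- r = q
              have h1 : p.1 ≤ min cur.1 q.1 :=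
                hpmin (min cur.1 q.1, q.2) (by simp) (by rw [← hreq, hr2])
              rw [hreq]
              exact le_trans h1 (min_le_right _ _)
            · exact hpmin r (by simp [hr'']) hr2
      · intro r hr
        rw [hstep]
        rcases List.mem_cons.mp hr with hreq | hr'
        · have := ihc (min cur.1 q.1, q.2) (by simp)
          rw [hreq, ← hv]
          simpa using this
        · rcases List.mem_cons.mp hr' with hreq | hr''
          · rw [hreq]
            exact ihc (min cur.1 q.1, q.2) (by simp)
          · exact ihc r (by simp [hr''])
    · -- emit cur, continue with q
      have hcq : cur.2 < q.2 := lt_of_le_of_ne (hcur q (by simp)) (fun h => hv h.symm)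
      obtain ⟨ihm, ihp, ihc⟩ := ih q hqrest
      have hstep : pvRunsGo cur (q :: rest) = cur :: pvRunsGo q rest := by
        simp [pvRunsGo, hv]
      refine ⟨?_, ?_, ?_⟩
      · intro p hp
        rw [hstep] at hp
        rcases List.mem_cons.mp hp with hpeq | hp'
        · refine ⟨by rw [hpeq]; simp, ?_⟩
          intro r hr hr2
          rcases List.mem_cons.mp hr with hreq | hr'
          · rw [hpeq, hreq]
          · exfalso
            rw [hpeq] at hr2
            have hrge : q.2 ≤ r.2 := by
              rcases List.mem_cons.mp hr' with hreq | hr''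
              · rw [hreq]
              · exact hq r hr''
            have h1 : cur.2 < r.2 := lt_of_lt_of_le hcq hrge
            rw [hr2] at h1
            exact lt_irrefl _ h1
        · obtain ⟨hpm, hpmin⟩ := ihm p hp'
          refine ⟨List.mem_cons.mpr (Or.inr hpm), ?_⟩
          intro r hr hr2
          rcases List.mem_cons.mp hr with hreq | hr'
          · -- r = cur: but p's value is ≥ q.2 > cur.2
            exfalso
            have hpge : q.2 ≤ p.2 := by
              rcases List.mem_cons.mp hpm with hpeq | hpm'
              · rw [hpeq]
              · exact hq p hpm'
            rw [hreq] at hr2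
            have : cur.2 < cur.2 := by
              have h1 : cur.2 < p.2 := lt_of_lt_of_le hcq hpge
              rw [← hr2] at h1
              exact h1
            exact lt_irrefl _ this
          · exact hpmin r hr' hr2
      · rw [hstep]
        simp only [List.map_cons]
        refine List.pairwise_cons.mpr ⟨?_, ihp⟩
        intro b hb
        rcases List.mem_map.mp hb with ⟨p, hp, hpb⟩
        have hpm : p ∈ q :: rest := (ihm p hp).1
        have hple : q.2 ≤ p.2 := by
          rcases List.mem_cons.mp hpm with hpeq | hpm'
          · rw [hpeq]
          · exact hq p hpm'
        rw [← hpb]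
        exact lt_of_lt_of_le hcq hple
      · intro r hr
        rw [hstep]
        rcases List.mem_cons.mp hr with hreq | hr'
        · rw [hreq]; simp
        · simp only [List.map_cons, List.mem_cons]
          exact Or.inr (ihc r hr')

-- two elements of a strictly position-sorted list with the same position are equal
theorem pvEq_of_fst (L : List (Int × String)) (hL : L.Pairwise (fun p q => p.1 < q.1))
    {p r : Int × String} (hp : p ∈ L) (hr : r ∈ L) (h : p.1 = r.1) : p = r := by
  induction L with
  | nil => simp at hp
  | cons x t ih =>
    rcases List.pairwise_cons.mp hL with ⟨hx, ht⟩
    rcases List.mem_cons.mp hp with hpe | hp' <;> rcases List.mem_cons.mp hr with hre | hr'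
    · rw [hpe, hre]
    · exfalso
      have hlt := hx r hr'
      rw [← hpe, h] at hlt
      exact lt_irrefl _ hlt
    · exfalso
      have hlt := hx p hp'
      rw [← hre, ← h] at hlt
      exact lt_irrefl _ hlt
    · exact ih ht hp' hr'

-- values of the filtered enumeration are the filtered values
theorem pvMap_snd_filter_enumerate (t : List String) (s : Int) :
    ((PySem.List.enumerate t s).filter (fun p => p.2 != "")).map (fun p => p.2)
      = t.filter (fun v => v != "") := by
  induction t generalizing s with
  | nil => simp [PySem.List.enumerate_nil]
  | cons v rest ih =>
    rw [PySem.List.enumerate_cons]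
    by_cases hv : v = ""
    · simp [hv, ih]
    · simp [hv, ih]

-- THE CORE: B's sort-scan-sort pipeline equals the first-occurrence dedup of the pairs
theorem pvPipeline_eq_ref (t : List String) :
    PySem.List.sorted
      (pvRuns (PySem.List.sorted ((PySem.List.enumerate t).filter (fun p => p.2 != "")) (fun p => p.2) false))
      (fun p => p.1) false
    = pvRef ((PySem.List.enumerate t).filter (fun p => p.2 != "")) := by
  set P := (PySem.List.enumerate t).filter (fun p => p.2 != "") with hPdef
  have hP : P.Pairwise (fun p q => p.1 < q.1) :=
    (PySem.List.pairwise_lt_enumerate t 0).sublist List.filter_sublist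
  set S := PySem.List.sorted P (fun p => p.2) false with hSdef
  have hSP : S.Perm P := PySem.List.sorted_perm P (fun p => p.2) false
  have hSpw : S.Pairwise (fun p q => p.2 ≤ q.2) := PySem.List.sorted_pairwise P (fun p => p.2)
  have hFr_pw : (pvRef P).Pairwise (fun p q => p.1 < q.1) := pvRef_pairwise P hP
  -- runs spec on S
  rcases hS : S with _ | ⟨s0, S'⟩
  · -- S = [] ⇒ P = [] ⇒ both sides []
    have hPnil : P = [] := (PySem.List.sorted_eq_nil_iff _ _ _).mp (by rw [← hSdef]; exact hS)
    rw [hPnil]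
    rfl
  · have hspec := pvRunsGo_spec S' s0 (hS ▸ hSpw)
    obtain ⟨hmem, hpw, hcomp⟩ := hspec
    have hE : pvRuns S = pvRunsGo s0 S' := by rw [hS]; rfl
    set E := pvRunsGo s0 S' with hEdef
    -- E and pvRef P have the same (nodup) members
    have hEnodup : E.Nodup := by
      have : E.Pairwise (fun p q => p.2 < q.2) := (List.pairwise_map).mp hpw
      exact this.imp (fun h => by intro he; rw [he] at h; exact lt_irrefl _ h)
    have hFnodup : (pvRef P).Nodup :=
      hFr_pw.imp (fun h => by intro he; rw [he] at h; exact lt_irrefl _ h)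
    have hmemP : ∀ p, p ∈ E → p ∈ P := fun p hp => (hSP.mem_iff).mp (hS ▸ (hmem p hp).1)
    have hsndF : ∀ v, v ∈ (pvRef P).map (fun p => p.2) ↔ v ∈ P.map (fun p => p.2) := by
      intro v
      rw [pvRef_map_snd, pvValRef_eq_ofList, PySem.Set.mem_ofList]
    have hiff : ∀ p, p ∈ E ↔ p ∈ pvRef P := by
      intro p
      constructor
      · intro hp
        have hpP : p ∈ P := hmemP p hp
        have hv : p.2 ∈ (pvRef P).map (fun q => q.2) :=
          (hsndF p.2).mpr (List.mem_map.mpr ⟨p, hpP, rfl⟩)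
        rcases List.mem_map.mp hv with ⟨r, hrF, hr2⟩
        have hrP : r ∈ P := (pvRef_sublist P).mem hrF
        have hrS : r ∈ s0 :: S' := hS ▸ (hSP.mem_iff).mpr hrP
        have h1 : p.1 ≤ r.1 := (hmem p hp).2 r hrS hr2
        have h2 : r.1 ≤ p.1 := pvRef_min P hP r hrF p hpP hr2.symm
        have : p = r := pvEq_of_fst P hP hpP hrP (le_antisymm h1 h2)
        exact this ▸ hrF
      · intro hr
        have hrP : p ∈ P := (pvRef_sublist P).mem hr
        have hrS : p ∈ s0 :: S' := hS ▸ (hSP.mem_iff).mpr hrP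
        have hv : p.2 ∈ E.map (fun q => q.2) := hcomp p hrS
        rcases List.mem_map.mp hv with ⟨e, heE, he2⟩
        have heP : e ∈ P := hmemP e heE
        have h1 : e.1 ≤ p.1 := (hmem e heE).2 p hrS he2.symm
        have h2 : p.1 ≤ e.1 := pvRef_min P hP p hr e heP he2
        have : e = p := pvEq_of_fst P hP heP hrP (le_antisymm h1 h2)
        exact this ▸ heE
    have hperm : (pvRef P).Perm E :=
      (List.perm_ext_iff_of_nodup hFnodup hEnodup).mpr (fun a => (hiff a).symm)
    simp only [pvRuns]
    exact PySem.List.sorted_eq_of_perm_of_pairwise_lt _ _ _ hperm hFr_pw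

-- ===== VERDICT (by name: the statement is the Claim_ definition above) =====
theorem all_strings_py_spec : Claim_unchanged_all_strings_py := by
  intro l mv _ hD
  unfold D_all_strings_py at hD
  show all_strings_py l mv = all_strings_py_alt l mv
  unfold all_strings_py
  rw [pvOuterA_eq_go]
  set t := l.flatMap (fun info => (pvSwms info).map pvStripOf) with htdef
  by_cases hmv : 0 < mv
  · have hB : all_strings_py_alt l mv =
        (PySem.List.slice
          (PySem.List.sorted
            (pvRuns (PySem.List.sorted ((PySem.List.enumerate t).filter (fun p => p.2 != "")) (fun p => p.2) false))
            (fun p => p.1) false)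
          none (some mv)).map (fun p => p.2) := by
      simp [all_strings_py_alt, hmv, htdef]
    rw [hB, pvPipeline_eq_ref, PySem.List.slice_to,
        pvGo_take mv _ [] (by simpa using hmv), pvDd_eq_set]
    · rw [List.map_take, pvRef_map_snd, pvValRef_eq_ofList, pvMap_snd_filter_enumerate]
      simp [PySem.Set.ofList_eq_foldl]
    · omega
  · have hB : all_strings_py_alt l mv = [] := by
      simp [all_strings_py_alt, show ¬ (0 < mv) from hmv]
    have hall : ∀ v ∈ t, v = "" := by
      intro v hv
      by_contra hne
      exact hD ⟨by omega, (pvD_stream_iff l).mpr ⟨v, hv, hne⟩⟩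
    rw [hB, pvGo_all_empty mv _ [] hall]

theorem all_strings_py_changed : Claim_changed_all_strings_py := by
  unfold Claim_changed_all_strings_py; decide

theorem all_strings_py_tight : Claim_exact_all_strings_py := by
  intro l mv _ hD
  unfold D_all_strings_py at hD
  obtain ⟨hmv, hany⟩ := hD
  have hB : all_strings_py_alt l mv = [] := by
    simp [all_strings_py_alt, show ¬ (0 < mv) from by omega]
  rw [hB]
  unfold all_strings_py
  rw [pvOuterA_eq_go]
  exact pvGo_ne_nil mv _ [] (Or.inl ((pvD_stream_iff l).mp hany))
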